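-- pv_equiv track=rewrite | github.com/braujian565/envctl | envctl/deduplicator.py | deduplicate_set
-- ===== SOURCE A (Python) =====
-- from typing import Dict, List, Tuple
--
-- def deduplicate_set(
--     env: Dict[str, str],
--     strategy: str = "first",
-- ) -> Tuple[Dict[str, str], List[str]]:
--     """Return a deduplicated copy of *env* and the list of removed keys.
--
--     strategy:
--       - "first"  – keep the first occurrence (case-insensitive key comparison)
--       - "last"   – keep the last occurrence
--     """
--     if strategy not in ("first", "last"):
--         raise ValueError(f"Unknown strategy '{strategy}'. Choose 'first' or 'last'.")
--
--     items = list(env.items())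
--     if strategy == "last":
--         items = list(reversed(items))
--
--     seen: Dict[str, str] = {}
--     removed: List[str] = []
--     for key, value in items:
--         normalised = key.upper()
--         if normalised in seen:
--             removed.append(key)
--         else:
--             seen[normalised] = key
--
--     kept_keys = set(seen.values())
--     result = {k: v for k, v in env.items() if k in kept_keys}
--     return result, sorted(removed)
-- ===== SOURCE B (Python) =====
-- def deduplicate_set(env, strategy="first"):
--     """Group keys by their upper-cased form, then pick the kept key per group."""
--     if strategy not in ("first", "last"):
--         raise ValueError(f"Unknown strategy '{strategy}'. Choose 'first' or 'last'.")
--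
--     groups = {}
--     for key in env:
--         groups.setdefault(key.upper(), []).append(key)
--
--     kept = set()
--     removed = []
--     for group in groups.values():
--         if strategy == "first":
--             kept.add(group[0])
--             removed.extend(group[1:])
--         else:
--             kept.add(group[-1])
--             removed.extend(group[:-1])
--
--     result = {k: v for k, v in env.items() if k in kept}
--     return result, sorted(removed)
-- ===== Notes on version B (the rewrite author's own statement) =====
-- stated objective: alternative
-- what changed: A reverses the dict for 'last' and scans once with a seen-dict of normalised keys; B instead groups the original keys by their upper-cased form in one dict of lists and then keeps group[0] ('first') or group[-1] ('last') per group, removing the rest.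
import Mathlib
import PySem

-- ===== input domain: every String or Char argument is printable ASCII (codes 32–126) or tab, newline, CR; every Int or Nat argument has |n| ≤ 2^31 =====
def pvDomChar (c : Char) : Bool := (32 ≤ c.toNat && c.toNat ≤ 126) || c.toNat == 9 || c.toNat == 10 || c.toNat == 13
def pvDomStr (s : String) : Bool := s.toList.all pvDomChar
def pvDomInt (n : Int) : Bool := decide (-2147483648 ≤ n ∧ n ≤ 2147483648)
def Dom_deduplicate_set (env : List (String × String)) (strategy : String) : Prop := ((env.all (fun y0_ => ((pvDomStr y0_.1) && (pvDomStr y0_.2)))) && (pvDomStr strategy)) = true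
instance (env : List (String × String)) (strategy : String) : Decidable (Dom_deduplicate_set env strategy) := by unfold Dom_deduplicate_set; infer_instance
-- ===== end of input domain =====

-- B replaces A's reverse-then-scan single pass by a group-by-normalised-key decomposition
-- (one grouping dict, then one pick per group); same cost, different structure ("alternative").

-- ===== PORT A =====
-- A raises ValueError on an unknown strategy; that case is excluded by Pre_ and the port
-- returns a dummy pair there.
def deduplicate_set (env : List (String × String)) (strategy : String) : (List (String × String)) × List String :=
  if ¬ (strategy = "first" ∨ strategy = "last") then ([], [])
  else
    let items := if strategy = "last" then env.reverse else env
    let sr := items.foldl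
      (fun (st : PySem.Dict String String × List String) kv =>
        let normalised := PySem.Str.upper kv.1
        if st.1.contains normalised then (st.1, st.2 ++ [kv.1])
        else (st.1.insert normalised kv.1, st.2))
      (PySem.Dict.empty, [])
    let kept := PySem.Set.ofList sr.1.values
    (env.filter (fun kv => PySem.Set.contains kept kv.1),
     PySem.List.sorted sr.2 (fun x => x) false)

-- ===== PORT B =====
-- group[0] / group[1:] / group[-1] / group[:-1] are ported as headD "" / tail / getLastD "" /
-- dropLast; every group in the grouping dict is nonempty, so the defaults are never read.
def deduplicate_set_alt (env : List (String × String)) (strategy : String) : (List (String × String)) × List String :=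
  if ¬ (strategy = "first" ∨ strategy = "last") then ([], [])
  else
    let groups := env.foldl
      (fun (d : PySem.Dict String (List String)) kv =>
        d.modify (PySem.Str.upper kv.1) [] (· ++ [kv.1]))
      PySem.Dict.empty
    let kr := groups.values.foldl
      (fun (st : PySem.Set String × List String) g =>
        if strategy = "first" then (PySem.Set.add st.1 (g.headD ""), st.2 ++ g.tail)
        else (PySem.Set.add st.1 (g.getLastD ""), st.2 ++ g.dropLast))
      (PySem.Set.empty, [])
    (env.filter (fun kv => PySem.Set.contains kr.1 kv.1),
     PySem.List.sorted kr.2 (fun x => x) false)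

-- ===== PRECONDITION & SPEC =====
-- Pre_ excludes (i) unknown strategies, on which the Python A raises ValueError, and
-- (ii) association lists with duplicate keys, which cannot arise from A's parameter of
-- Python type Dict[str, str] (a Python dict always has distinct keys).
def Pre_deduplicate_set (env : List (String × String)) (strategy : String) : Prop :=
  (strategy = "first" ∨ strategy = "last") ∧ (env.map Prod.fst).Nodup
instance (env : List (String × String)) (strategy : String) : Decidable (Pre_deduplicate_set env strategy) := by unfold Pre_deduplicate_set; infer_instance

def pvWitness_deduplicate_set : (List (String × String)) × String := ([("a", "1"), ("A", "2"), ("b", "3")], "first")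

def Spec_deduplicate_set (env : List (String × String)) (strategy : String) (out : (List (String × String)) × List String) : Prop := out = deduplicate_set_alt env strategy
instance (env : List (String × String)) (strategy : String) (out : (List (String × String)) × List String) : Decidable (Spec_deduplicate_set env strategy out) := by unfold Spec_deduplicate_set; infer_instance

-- ===== CLAIM (what is proved, stated in full; the proofs are below) =====
def Claim_equal_deduplicate_set : Prop := ∀ (env : List (String × String)) (strategy : String), Dom_deduplicate_set env strategy → Pre_deduplicate_set env strategy → Spec_deduplicate_set env strategy (deduplicate_set env strategy)

-- ===== LEMMAS AND PROOFS =====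

def pvStepK (st : PySem.Dict String String × List String) (k : String) : PySem.Dict String String × List String :=
  if st.1.contains (PySem.Str.upper k) then (st.1, st.2 ++ [k])
  else (st.1.insert (PySem.Str.upper k) k, st.2)

def pvRemR (K : List String) : List String → List String
  | [] => []
  | k :: t => if (PySem.Str.upper k) ∈ K then k :: pvRemR K t else pvRemR (K ++ [PySem.Str.upper k]) t

theorem pv_foldl_eq_stepK (env : List (String × String)) (s : PySem.Dict String String) (r : List String) :
    env.foldl
      (fun (st : PySem.Dict String String × List String) kv =>
        let normalised := PySem.Str.upper kv.1
        if st.1.contains normalised then (st.1, st.2 ++ [kv.1])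
        else (st.1.insert normalised kv.1, st.2)) (s, r)
    = (env.map Prod.fst).foldl pvStepK (s, r) := by
  rw [List.foldl_map]; rfl

theorem pv_removed_foldl (ks : List String) : ∀ (s : PySem.Dict String String) (r : List String),
    (ks.foldl pvStepK (s, r)).2 = r ++ pvRemR s.keys ks := by
  induction ks with
  | nil => simp [pvRemR]
  | cons k t ih =>
    intro s r
    by_cases h : s.contains (PySem.Str.upper k) = true
    · have hm : PySem.Str.upper k ∈ s.keys := by
        have := PySem.Dict.contains_eq_decide_mem_keys s (PySem.Str.upper k)
        rw [this] at h; exact of_decide_eq_true h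
      simp only [List.foldl_cons, pvStepK, h, if_pos, pvRemR, hm]
      rw [ih]
      simp
    · have hm : PySem.Str.upper k ∉ s.keys := by
        have := PySem.Dict.contains_eq_decide_mem_keys s (PySem.Str.upper k)
        rw [this] at h; simpa using h
      simp only [List.foldl_cons, pvStepK, h, pvRemR, hm, Bool.false_eq_true, if_false]
      rw [ih, PySem.Dict.keys_insert_of_not_contains s k (by simpa using h)]

theorem pv_remR_sublist (ks : List String) : ∀ (K : List String), List.Sublist (pvRemR K ks) ks := by
  induction ks with
  | nil => intro K; simp [pvRemR]
  | cons k t ih =>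
    intro K
    by_cases h : PySem.Str.upper k ∈ K
    · simpa [pvRemR, h] using (ih K).cons₂ k
    · simpa [pvRemR, h] using (ih (K ++ [PySem.Str.upper k])).cons k

theorem pv_mem_remR (x : String) : ∀ (ks : List String) (K : List String), ks.Nodup →
    (x ∈ pvRemR K ks ↔ x ∈ ks ∧ ((PySem.Str.upper x) ∈ K ∨
      ks.find? (fun k => PySem.Str.upper k == PySem.Str.upper x) ≠ some x)) := by
  intro ks
  induction ks with
  | nil => intro K _; simp [pvRemR]
  | cons k t ih =>
    intro K hnd
    have hndt : t.Nodup := hnd.of_cons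
    have hk : k ∉ t := (List.nodup_cons.mp hnd).1
    by_cases h : PySem.Str.upper k ∈ K
    · simp only [pvRemR, if_pos h, List.mem_cons, List.find?_cons]
      constructor
      · rintro (rfl | hx)
        · exact ⟨Or.inl rfl, Or.inl h⟩
        · rcases (ih K hndt).1 hx with ⟨hxt, hcond⟩
          refine ⟨Or.inr hxt, ?_⟩
          rcases hcond with hK | hf
          · exact Or.inl hK
          · by_cases hu : (PySem.Str.upper k == PySem.Str.upper x) = true
            · simp only [hu]
              right
              intro hkx
              have : k = x := by injection hkx
              subst this
              exact hk hxt
            · simp only [Bool.not_eq_true] at hu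
              simp only [hu]
              exact Or.inr hf
      · rintro ⟨hx | hxt, hcond⟩
        · exact Or.inl hx
        · right
          refine (ih K hndt).2 ⟨hxt, ?_⟩
          rcases hcond with hK | hf
          · exact Or.inl hK
          · by_cases hu : (PySem.Str.upper k == PySem.Str.upper x) = true
            · have hq : PySem.Str.upper k = PySem.Str.upper x := by simpa using hu
              exact Or.inl (hq ▸ h)
            · simp only [Bool.not_eq_true] at hu
              simp only [hu] at hf
              exact Or.inr hf
    · simp only [pvRemR, if_neg h, List.mem_cons, List.find?_cons]
      rw [ih (K ++ [PySem.Str.upper k]) hndt]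
      constructor
      · rintro ⟨hxt, hcond⟩
        refine ⟨Or.inr hxt, ?_⟩
        rcases hcond with hK | hf
        · rcases List.mem_append.1 hK with hK | hK
          · exact Or.inl hK
          · have hq : PySem.Str.upper x = PySem.Str.upper k := by simpa using hK
            have hu : (PySem.Str.upper k == PySem.Str.upper x) = true := by simp [hq]
            simp only [hu]
            right
            intro hkx
            have : k = x := by injection hkx
            subst this
            exact hk hxt
        · by_cases hu : (PySem.Str.upper k == PySem.Str.upper x) = true
          · simp only [hu]
            right
            intro hkx
            have : k = x := by injection hkx
            subst this
            exact hk hxt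
          · simp only [Bool.not_eq_true] at hu
            simp only [hu]
            exact Or.inr hf
      · rintro ⟨hx | hxt, hcond⟩
        · subst hx
          exfalso
          rcases hcond with hK | hf
          · exact h hK
          · simp at hf
        · refine ⟨hxt, ?_⟩
          rcases hcond with hK | hf
          · exact Or.inl (List.mem_append.2 (Or.inl hK))
          · by_cases hu : (PySem.Str.upper k == PySem.Str.upper x) = true
            · have hq : PySem.Str.upper x = PySem.Str.upper k := by
                have := (beq_iff_eq).1 hu; exact this.symm
              exact Or.inl (List.mem_append.2 (Or.inr (by simp [hq])))
            · simp only [Bool.not_eq_true] at hu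
              simp only [hu] at hf
              exact Or.inr hf

theorem pv_values_insert_fresh (s : PySem.Dict String String) (u k : String)
    (h : s.contains u = false) : (s.insert u k).values = s.values ++ [k] := by
  have hi := PySem.Dict.items_insert_of_not_contains s k h
  simp only [PySem.Dict.values, hi, List.map_append, List.map_cons, List.map_nil]

theorem pv_contains_insert (s : PySem.Dict String String) (u k v : String) :
    (s.insert u k).contains v = (decide (v = u) || s.contains v) := by
  rw [PySem.Dict.contains_eq_decide_mem_keys, PySem.Dict.contains_eq_decide_mem_keys]
  by_cases h : s.contains u = true
  · rw [PySem.Dict.keys_insert_of_contains s k h]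
    by_cases hv : v = u
    · subst hv
      have : v ∈ s.keys := by
        have := PySem.Dict.contains_eq_decide_mem_keys s v
        rw [this] at h; exact of_decide_eq_true h
      simp [this]
    · simp [hv]
  · have h' : s.contains u = false := by simpa using h
    rw [PySem.Dict.keys_insert_of_not_contains s k h']
    by_cases hv : v = u
    · subst hv; simp
    · simp [hv]

theorem pv_mem_values_foldl (x : String) (ks : List String) :
    ∀ (s : PySem.Dict String String) (r : List String),
    (x ∈ ((ks.foldl pvStepK (s, r)).1).values ↔ x ∈ s.values ∨
      (s.contains (PySem.Str.upper x) = false ∧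
       ks.find? (fun k => PySem.Str.upper k == PySem.Str.upper x) = some x)) := by
  induction ks with
  | nil => intro s r; simp
  | cons k t ih =>
    intro s r
    by_cases h : s.contains (PySem.Str.upper k) = true
    · simp only [List.foldl_cons, pvStepK, if_pos h, List.find?_cons]
      rw [ih s (r ++ [k])]
      by_cases hu : (PySem.Str.upper k == PySem.Str.upper x) = true
      · have hq : PySem.Str.upper k = PySem.Str.upper x := by simpa using hu
        have hcx : s.contains (PySem.Str.upper x) = true := hq ▸ h
        simp [hu, hcx]
      · simp only [Bool.not_eq_true] at hu
        simp [hu]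
    · have h' : s.contains (PySem.Str.upper k) = false := by simpa using h
      simp only [List.foldl_cons, pvStepK, h', Bool.false_eq_true, if_false, List.find?_cons]
      rw [ih (s.insert (PySem.Str.upper k) k) r]
      rw [pv_values_insert_fresh s _ k h', pv_contains_insert]
      by_cases hu : (PySem.Str.upper k == PySem.Str.upper x) = true
      · have hq : PySem.Str.upper k = PySem.Str.upper x := by simpa using hu
        have hcx : s.contains (PySem.Str.upper x) = false := hq ▸ h'
        simp only [hq, beq_self_eq_true]
        constructor
        · rintro (hv | ⟨hc, hf⟩)
          · rcases List.mem_append.1 hv with hv | hv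
            · exact Or.inl hv
            · simp only [List.mem_singleton] at hv
              subst hv
              exact Or.inr ⟨hcx, rfl⟩
          · simp at hc
        · rintro (hv | ⟨hc, hf⟩)
          · exact Or.inl (List.mem_append.2 (Or.inl hv))
          · have : k = x := by injection hf
            subst this
            exact Or.inl (List.mem_append.2 (Or.inr (by simp)))
      · have hq : PySem.Str.upper k ≠ PySem.Str.upper x := by simpa using hu
        have hxk : x ≠ k := fun hxe => hq (by rw [hxe])
        simp only [Bool.not_eq_true] at hu
        simp only [hu]
        have hne : ¬ (PySem.Str.upper x = PySem.Str.upper k) := fun e => hq e.symm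
        simp only [hne, decide_false, Bool.false_or]
        constructor
        · rintro (hv | hrest)
          · rcases List.mem_append.1 hv with hv | hv
            · exact Or.inl hv
            · simp only [List.mem_singleton] at hv
              exact absurd hv hxk
          · exact Or.inr hrest
        · rintro (hv | hrest)
          · exact Or.inl (List.mem_append.2 (Or.inl hv))
          · exact Or.inr hrest

def pvGroups (env : List (String × String)) : PySem.Dict String (List String) :=
  env.foldl (fun d kv => d.modify (PySem.Str.upper kv.1) [] (· ++ [kv.1])) PySem.Dict.empty

theorem pv_groups_getD (env : List (String × String)) (u : String) :
    (pvGroups env).getD u [] = (env.map Prod.fst).filter (fun k => PySem.Str.upper k == u) := by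
  unfold pvGroups
  rw [show (env.foldl (fun d kv => d.modify (PySem.Str.upper kv.1) [] (· ++ [kv.1])) PySem.Dict.empty)
      = ((env.map (fun kv => (PySem.Str.upper kv.1, kv.1))).foldl
          (fun d p => d.modify p.1 [] (fun x => x ++ [p.2])) PySem.Dict.empty) by
    rw [List.foldl_map]]
  rw [PySem.Dict.getD_foldl_modify_append]
  simp [List.filter_map, List.map_map, Function.comp_def]

theorem pv_groups_keys (env : List (String × String)) :
    (pvGroups env).keys = PySem.Set.ofList ((env.map Prod.fst).map PySem.Str.upper) := by
  unfold pvGroups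
  rw [show (fun (d : PySem.Dict String (List String)) kv =>
        d.modify (PySem.Str.upper kv.1) [] (· ++ [kv.1]))
      = (fun d kv => d.modify ((fun (kv : String × String) => PySem.Str.upper kv.1) kv) []
          ((fun (_ : PySem.Dict String (List String)) (kv : String × String) (x : List String) => x ++ [kv.1]) d kv)) from rfl]
  rw [PySem.Dict.keys_foldl_modify_key]
  rw [PySem.Set.ofList_eq_foldl]
  simp [PySem.Set.update, List.foldl_map, PySem.Dict.keys, PySem.Dict.empty, List.map_map, Function.comp_def]

theorem pv_groups_keys_nodup (env : List (String × String)) : (pvGroups env).keys.Nodup := by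
  rw [pv_groups_keys]; exact PySem.Set.nodup_ofList _

theorem pv_groups_values (env : List (String × String)) :
    (pvGroups env).values
      = (PySem.Set.ofList ((env.map Prod.fst).map PySem.Str.upper)).map
          (fun u => (env.map Prod.fst).filter (fun k => PySem.Str.upper k == u)) := by
  rw [PySem.Dict.values_eq_map_keys _ (pv_groups_keys_nodup env) []]
  rw [pv_groups_keys]
  exact List.map_congr_left (fun u _ => pv_groups_getD env u)

theorem pv_mem_tail_of_nodup (l : List String) (x : String) (h : l.Nodup) :
    x ∈ l.tail ↔ x ∈ l ∧ l.head? ≠ some x := by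
  cases l with
  | nil => simp
  | cons a t =>
    have ha : a ∉ t := (List.nodup_cons.mp h).1
    simp only [List.tail_cons, List.head?_cons, List.mem_cons]
    constructor
    · intro hx
      refine ⟨Or.inr hx, ?_⟩
      intro he
      have : a = x := by injection he
      subst this; exact ha hx
    · rintro ⟨hx | hx, hne⟩
      · subst hx; simp at hne
      · exact hx

theorem pv_dropLast_eq (l : List String) : l.dropLast = l.reverse.tail.reverse := by
  induction l using List.reverseRecOn with
  | nil => simp
  | append_singleton t a ih => simp

theorem pv_mem_dropLast_of_nodup (l : List String) (x : String) (h : l.Nodup) :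
    x ∈ l.dropLast ↔ x ∈ l ∧ l.getLast? ≠ some x := by
  rw [pv_dropLast_eq, List.getLast?_eq_head?_reverse]
  rw [List.mem_reverse, pv_mem_tail_of_nodup _ _ (by simpa using h), List.mem_reverse]

theorem pv_headD_eq (l : List String) (x : String) (h : l.head? = some x) : l.headD "" = x := by
  cases l with
  | nil => simp at h
  | cons a t => simp at h ⊢; exact h

theorem pv_getLastD_eq (l : List String) (x : String) (h : l.getLast? = some x) : l.getLastD "" = x := by
  rw [List.getLastD_eq_getLast?, h]; rfl

theorem pv_getLast_filter (ks : List String) (p : String → Bool) :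
    (ks.filter p).getLast? = ks.reverse.find? p := by
  rw [List.getLast?_eq_head?_reverse, ← List.filter_reverse, List.head?_filter]

theorem pv_mem_kept_first (ks : List String) (x : String) :
    (x ∈ ((PySem.Set.ofList (ks.map PySem.Str.upper)).map
        (fun u => ks.filter (fun k => PySem.Str.upper k == u))).map (fun g => g.headD "")
      ↔ ks.find? (fun k => PySem.Str.upper k == PySem.Str.upper x) = some x) := by
  rw [List.map_map]
  constructor
  · intro hx
    rcases List.mem_map.1 hx with ⟨u, hu, hx⟩
    simp only [Function.comp_apply] at hx
    have hu' : u ∈ ks.map PySem.Str.upper := (PySem.Set.mem_ofList _ _).1 hu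
    rcases List.mem_map.1 hu' with ⟨k0, hk0, huk⟩
    have hk0f : k0 ∈ ks.filter (fun k => PySem.Str.upper k == u) :=
      List.mem_filter.2 ⟨hk0, by simp [huk]⟩
    have hne : ks.filter (fun k => PySem.Str.upper k == u) ≠ [] := List.ne_nil_of_mem hk0f
    have hh : (ks.filter (fun k => PySem.Str.upper k == u)).head? = some x := by
      rcases List.exists_cons_of_ne_nil hne with ⟨a, t, hg⟩
      rw [hg] at hx ⊢
      simp only [List.headD_cons] at hx
      simp [hx]
    have hf : ks.find? (fun k => PySem.Str.upper k == u) = some x := by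
      rw [← List.head?_filter]; exact hh
    have hpx := List.find?_some (p := fun k => PySem.Str.upper k == u) hf
    have : u = PySem.Str.upper x := by
      have := (beq_iff_eq).1 hpx; exact this.symm
    subst this
    exact hf
  · intro hf
    have hx : x ∈ ks := List.mem_of_find?_eq_some hf
    refine List.mem_map.2 ⟨PySem.Str.upper x, (PySem.Set.mem_ofList _ _).2 (List.mem_map_of_mem hx), ?_⟩
    simp only [Function.comp_apply]
    exact pv_headD_eq _ _ (by rw [List.head?_filter]; exact hf)

theorem pv_mem_kept_last (ks : List String) (x : String) :
    (x ∈ ((PySem.Set.ofList (ks.map PySem.Str.upper)).map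
        (fun u => ks.filter (fun k => PySem.Str.upper k == u))).map (fun g => g.getLastD "")
      ↔ ks.reverse.find? (fun k => PySem.Str.upper k == PySem.Str.upper x) = some x) := by
  rw [List.map_map]
  constructor
  · intro hx
    rcases List.mem_map.1 hx with ⟨u, hu, hx⟩
    simp only [Function.comp_apply] at hx
    have hu' : u ∈ ks.map PySem.Str.upper := (PySem.Set.mem_ofList _ _).1 hu
    rcases List.mem_map.1 hu' with ⟨k0, hk0, huk⟩
    have hk0f : k0 ∈ ks.filter (fun k => PySem.Str.upper k == u) :=
      List.mem_filter.2 ⟨hk0, by simp [huk]⟩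
    have hne : ks.filter (fun k => PySem.Str.upper k == u) ≠ [] := List.ne_nil_of_mem hk0f
    have hl : (ks.filter (fun k => PySem.Str.upper k == u)).getLast? = some x := by
      have hs : (ks.filter (fun k => PySem.Str.upper k == u)).getLast?.isSome := by
        rw [List.getLast?_isSome]; exact hne
      rcases Option.isSome_iff_exists.1 hs with ⟨y, hy⟩
      rw [hy]
      exact congrArg some (by rw [← hx, pv_getLastD_eq _ _ hy])
    have hf : ks.reverse.find? (fun k => PySem.Str.upper k == u) = some x := by
      rw [← pv_getLast_filter]; exact hl
    have hpx := List.find?_some (p := fun k => PySem.Str.upper k == u) hf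
    have : u = PySem.Str.upper x := by
      have := (beq_iff_eq).1 hpx; exact this.symm
    subst this
    exact hf
  · intro hf
    have hx : x ∈ ks := by
      have := List.mem_of_find?_eq_some hf
      simpa using this
    refine List.mem_map.2 ⟨PySem.Str.upper x, (PySem.Set.mem_ofList _ _).2 (List.mem_map_of_mem hx), ?_⟩
    simp only [Function.comp_apply]
    exact pv_getLastD_eq _ _ (by rw [pv_getLast_filter]; exact hf)

theorem pv_mem_removed_first (ks : List String) (x : String) (hnd : ks.Nodup) :
    (x ∈ ((PySem.Set.ofList (ks.map PySem.Str.upper)).map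
        (fun u => ks.filter (fun k => PySem.Str.upper k == u))).flatMap (fun g => g.tail)
      ↔ x ∈ ks ∧ ks.find? (fun k => PySem.Str.upper k == PySem.Str.upper x) ≠ some x) := by
  constructor
  · intro hx
    rcases List.mem_flatMap.1 hx with ⟨g, hg, hxg⟩
    rcases List.mem_map.1 hg with ⟨u, hu, rfl⟩
    have hgn : (ks.filter (fun k => PySem.Str.upper k == u)).Nodup := hnd.filter _
    rcases (pv_mem_tail_of_nodup _ _ hgn).1 hxg with ⟨hxf, hhd⟩
    have hux : (PySem.Str.upper x == u) = true := (List.mem_filter.1 hxf).2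
    have : u = PySem.Str.upper x := ((beq_iff_eq).1 hux).symm
    subst this
    refine ⟨(List.mem_filter.1 hxf).1, ?_⟩
    rw [← List.head?_filter]
    exact hhd
  · rintro ⟨hx, hf⟩
    refine List.mem_flatMap.2 ⟨ks.filter (fun k => PySem.Str.upper k == PySem.Str.upper x),
      List.mem_map.2 ⟨PySem.Str.upper x, (PySem.Set.mem_ofList _ _).2 (List.mem_map_of_mem hx), rfl⟩, ?_⟩
    rw [pv_mem_tail_of_nodup _ _ (hnd.filter _)]
    refine ⟨List.mem_filter.2 ⟨hx, by simp⟩, ?_⟩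
    rw [List.head?_filter]
    exact hf

theorem pv_mem_removed_last (ks : List String) (x : String) (hnd : ks.Nodup) :
    (x ∈ ((PySem.Set.ofList (ks.map PySem.Str.upper)).map
        (fun u => ks.filter (fun k => PySem.Str.upper k == u))).flatMap (fun g => g.dropLast)
      ↔ x ∈ ks ∧ ks.reverse.find? (fun k => PySem.Str.upper k == PySem.Str.upper x) ≠ some x) := by
  constructor
  · intro hx
    rcases List.mem_flatMap.1 hx with ⟨g, hg, hxg⟩
    rcases List.mem_map.1 hg with ⟨u, hu, rfl⟩
    have hgn : (ks.filter (fun k => PySem.Str.upper k == u)).Nodup := hnd.filter _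
    rcases (pv_mem_dropLast_of_nodup _ _ hgn).1 hxg with ⟨hxf, hhd⟩
    have hux : (PySem.Str.upper x == u) = true := (List.mem_filter.1 hxf).2
    have : u = PySem.Str.upper x := ((beq_iff_eq).1 hux).symm
    subst this
    refine ⟨(List.mem_filter.1 hxf).1, ?_⟩
    rw [← pv_getLast_filter]
    exact hhd
  · rintro ⟨hx, hf⟩
    refine List.mem_flatMap.2 ⟨ks.filter (fun k => PySem.Str.upper k == PySem.Str.upper x),
      List.mem_map.2 ⟨PySem.Str.upper x, (PySem.Set.mem_ofList _ _).2 (List.mem_map_of_mem hx), rfl⟩, ?_⟩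
    rw [pv_mem_dropLast_of_nodup _ _ (hnd.filter _)]
    refine ⟨List.mem_filter.2 ⟨hx, by simp⟩, ?_⟩
    rw [pv_getLast_filter]
    exact hf

theorem pv_nodup_flatMap (ks : List String) (hnd : ks.Nodup) (f : List String → List String)
    (hf : ∀ g : List String, List.Sublist (f g) g) :
    (((PySem.Set.ofList (ks.map PySem.Str.upper)).map
        (fun u => ks.filter (fun k => PySem.Str.upper k == u))).flatMap f).Nodup := by
  rw [List.flatMap_def, List.nodup_flatten]
  constructor
  · intro l hl
    rcases List.mem_map.1 hl with ⟨g, hg, rfl⟩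
    rcases List.mem_map.1 hg with ⟨u, _, rfl⟩
    exact (hf _).nodup (hnd.filter _)
  · rw [List.map_map, List.pairwise_map]
    have hU : (PySem.Set.ofList (ks.map PySem.Str.upper)).Nodup := PySem.Set.nodup_ofList _
    refine List.Pairwise.imp_of_mem ?_ hU
    intro u v _ _ huv a ha ha'
    have h1 : a ∈ ks.filter (fun k => PySem.Str.upper k == u) := (hf _).subset ha
    have h2 : a ∈ ks.filter (fun k => PySem.Str.upper k == v) := (hf _).subset ha'
    have e1 : PySem.Str.upper a = u := (beq_iff_eq).1 (List.mem_filter.1 h1).2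
    have e2 : PySem.Str.upper a = v := (beq_iff_eq).1 (List.mem_filter.1 h2).2
    exact huv (e1 ▸ e2)

theorem pv_equal_first (env : List (String × String)) (hnd : (env.map Prod.fst).Nodup) :
    deduplicate_set env "first" = deduplicate_set_alt env "first" := by
  have hA : deduplicate_set env "first"
      = (env.filter (fun kv => PySem.Set.contains (PySem.Set.ofList
            ((env.foldl (fun (st : PySem.Dict String String × List String) kv =>
                let normalised := PySem.Str.upper kv.1
                if st.1.contains normalised then (st.1, st.2 ++ [kv.1])
                else (st.1.insert normalised kv.1, st.2)) (PySem.Dict.empty, [])).1.values)) kv.1),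
         PySem.List.sorted ((env.foldl (fun (st : PySem.Dict String String × List String) kv =>
                let normalised := PySem.Str.upper kv.1
                if st.1.contains normalised then (st.1, st.2 ++ [kv.1])
                else (st.1.insert normalised kv.1, st.2)) (PySem.Dict.empty, [])).2) (fun x => x) false) := rfl
  have hB : deduplicate_set_alt env "first"
      = (env.filter (fun kv => PySem.Set.contains
            (((pvGroups env).values.foldl (fun (st : PySem.Set String × List String) g =>
                (PySem.Set.add st.1 (g.headD ""), st.2 ++ g.tail)) (PySem.Set.empty, [])).1) kv.1),
         PySem.List.sorted (((pvGroups env).values.foldl (fun (st : PySem.Set String × List String) g =>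
                (PySem.Set.add st.1 (g.headD ""), st.2 ++ g.tail)) (PySem.Set.empty, [])).2) (fun x => x) false) := rfl
  rw [hA, hB, pv_foldl_eq_stepK,
    PySem.List.foldl_prod_mk (fun (a : PySem.Set String) (g : List String) => PySem.Set.add a (g.headD ""))
      (fun (r : List String) (g : List String) => r ++ g.tail) (pvGroups env).values PySem.Set.empty []]
  have hkept : ((pvGroups env).values.foldl (fun (a : PySem.Set String) (g : List String) => PySem.Set.add a (g.headD "")) PySem.Set.empty)
      = PySem.Set.ofList ((pvGroups env).values.map (fun g => g.headD "")) := by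
    rw [PySem.Set.ofList_eq_foldl, List.foldl_map]; rfl
  have hrem : ((pvGroups env).values.foldl (fun (r : List String) (g : List String) => r ++ g.tail) [])
      = (pvGroups env).values.flatMap (fun g => g.tail) := by
    rw [PySem.List.foldl_append_eq_flatMap]; rfl
  rw [hkept, hrem, pv_removed_foldl, pv_groups_values]
  have hkeys : (PySem.Dict.empty : PySem.Dict String String).keys = [] := rfl
  have hvals : (PySem.Dict.empty : PySem.Dict String String).values = [] := rfl
  rw [hkeys]
  congr 1
  · apply List.filter_congr
    intro kv _
    rw [Bool.eq_iff_iff, PySem.Set.contains_iff, PySem.Set.contains_iff,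
      PySem.Set.mem_ofList, PySem.Set.mem_ofList, pv_mem_values_foldl, pv_mem_kept_first]
    rw [hvals, PySem.Dict.contains_empty]
    simp
  · have ndA : (pvRemR [] (env.map Prod.fst)).Nodup := (pv_remR_sublist _ []).nodup hnd
    have ndB := pv_nodup_flatMap (env.map Prod.fst) hnd (fun g => g.tail)
      (fun g => List.tail_sublist g)
    have hmem : ∀ x, x ∈ pvRemR [] (env.map Prod.fst) ↔
        x ∈ ((PySem.Set.ofList ((env.map Prod.fst).map PySem.Str.upper)).map
          (fun u => (env.map Prod.fst).filter (fun k => PySem.Str.upper k == u))).flatMap (fun g => g.tail) := by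
      intro x
      rw [pv_mem_remR x _ [] hnd, pv_mem_removed_first _ _ hnd]
      simp
    have hperm := (List.perm_ext_iff_of_nodup ndA ndB).2 hmem
    rw [List.nil_append]
    exact PySem.List.sorted_id_eq_of_perm_of_pairwise _ _
      ((PySem.List.sorted_perm _ _ _).trans hperm.symm) (PySem.List.sorted_pairwise _ _)

theorem pv_equal_last (env : List (String × String)) (hnd : (env.map Prod.fst).Nodup) :
    deduplicate_set env "last" = deduplicate_set_alt env "last" := by
  have hA : deduplicate_set env "last"
      = (env.filter (fun kv => PySem.Set.contains (PySem.Set.ofList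
            ((env.reverse.foldl (fun (st : PySem.Dict String String × List String) kv =>
                let normalised := PySem.Str.upper kv.1
                if st.1.contains normalised then (st.1, st.2 ++ [kv.1])
                else (st.1.insert normalised kv.1, st.2)) (PySem.Dict.empty, [])).1.values)) kv.1),
         PySem.List.sorted ((env.reverse.foldl (fun (st : PySem.Dict String String × List String) kv =>
                let normalised := PySem.Str.upper kv.1
                if st.1.contains normalised then (st.1, st.2 ++ [kv.1])
                else (st.1.insert normalised kv.1, st.2)) (PySem.Dict.empty, [])).2) (fun x => x) false) := rfl
  have hB : deduplicate_set_alt env "last"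
      = (env.filter (fun kv => PySem.Set.contains
            (((pvGroups env).values.foldl (fun (st : PySem.Set String × List String) g =>
                (PySem.Set.add st.1 (g.getLastD ""), st.2 ++ g.dropLast)) (PySem.Set.empty, [])).1) kv.1),
         PySem.List.sorted (((pvGroups env).values.foldl (fun (st : PySem.Set String × List String) g =>
                (PySem.Set.add st.1 (g.getLastD ""), st.2 ++ g.dropLast)) (PySem.Set.empty, [])).2) (fun x => x) false) := rfl
  rw [hA, hB, pv_foldl_eq_stepK,
    PySem.List.foldl_prod_mk (fun (a : PySem.Set String) (g : List String) => PySem.Set.add a (g.getLastD ""))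
      (fun (r : List String) (g : List String) => r ++ g.dropLast) (pvGroups env).values PySem.Set.empty []]
  have hkept : ((pvGroups env).values.foldl (fun (a : PySem.Set String) (g : List String) => PySem.Set.add a (g.getLastD "")) PySem.Set.empty)
      = PySem.Set.ofList ((pvGroups env).values.map (fun g => g.getLastD "")) := by
    rw [PySem.Set.ofList_eq_foldl, List.foldl_map]; rfl
  have hrem : ((pvGroups env).values.foldl (fun (r : List String) (g : List String) => r ++ g.dropLast) [])
      = (pvGroups env).values.flatMap (fun g => g.dropLast) := by
    rw [PySem.List.foldl_append_eq_flatMap]; rfl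
  rw [hkept, hrem, pv_removed_foldl, pv_groups_values, List.map_reverse]
  have hkeys : (PySem.Dict.empty : PySem.Dict String String).keys = [] := rfl
  have hvals : (PySem.Dict.empty : PySem.Dict String String).values = [] := rfl
  rw [hkeys]
  have hndr : ((env.map Prod.fst).reverse).Nodup := List.nodup_reverse.mpr hnd
  congr 1
  · apply List.filter_congr
    intro kv _
    rw [Bool.eq_iff_iff, PySem.Set.contains_iff, PySem.Set.contains_iff,
      PySem.Set.mem_ofList, PySem.Set.mem_ofList, pv_mem_values_foldl, pv_mem_kept_last]
    rw [hvals, PySem.Dict.contains_empty]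
    simp
  · have ndA : (pvRemR [] ((env.map Prod.fst).reverse)).Nodup := (pv_remR_sublist _ []).nodup hndr
    have ndB := pv_nodup_flatMap (env.map Prod.fst) hnd (fun g => g.dropLast)
      (fun g => List.dropLast_sublist g)
    have hmem : ∀ x, x ∈ pvRemR [] ((env.map Prod.fst).reverse) ↔
        x ∈ ((PySem.Set.ofList ((env.map Prod.fst).map PySem.Str.upper)).map
          (fun u => (env.map Prod.fst).filter (fun k => PySem.Str.upper k == u))).flatMap (fun g => g.dropLast) := by
      intro x
      rw [pv_mem_remR x _ [] hndr, pv_mem_removed_last _ _ hnd]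
      simp
    have hperm := (List.perm_ext_iff_of_nodup ndA ndB).2 hmem
    rw [List.nil_append]
    exact PySem.List.sorted_id_eq_of_perm_of_pairwise _ _
      ((PySem.List.sorted_perm _ _ _).trans hperm.symm) (PySem.List.sorted_pairwise _ _)

-- ===== VERDICT (by name: the statement is the Claim_ definition above) =====
theorem deduplicate_set_spec : Claim_equal_deduplicate_set := by
  intro env strategy _ hpre
  obtain ⟨hstrat, hnd⟩ := hpre
  unfold Spec_deduplicate_set
  rcases hstrat with h | h <;> subst h
  · exact pv_equal_first env hnd
  · exact pv_equal_last env hnd
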